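-- pv_equiv track=rewrite | github.com/Parmjot23/Truckzone | company_core/accounts/management/commands/missing_invoice_sequence.py | iter_missing_ranges
-- ===== SOURCE A (Python) =====
-- def iter_missing_ranges(numbers):
--     numbers = sorted(numbers)
--     if not numbers:
--         return []
--     ranges = []
--     start = prev = numbers[0]
--     for value in numbers[1:]:
--         if value == prev + 1:
--             prev = value
--             continue
--         ranges.append((start, prev))
--         start = prev = value
--     ranges.append((start, prev))
--     return ranges
-- ===== SOURCE B (Python) =====
-- def iter_missing_ranges(numbers):
--     xs = sorted(numbers)
--     n = len(xs)
--     if n == 0: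
--         return []
--     cuts = [i for i in range(1, n) if xs[i] - xs[i - 1] != 1]
--     starts = [0] + cuts
--     ends = cuts + [n]
--     return [(xs[s], xs[e - 1]) for s, e in zip(starts, ends)]
-- ===== Notes on version B (the rewrite author's own statement) =====
-- stated objective: alternative
-- what changed: Replaces A's single stateful pass (carrying start/prev and appending as it goes) with staged passes: first compute the list of boundary indices where adjacent sorted values do not differ by 1, then pair each segment's start index (index zero plus the cuts) with its end index (the cuts plus n) and index back into the sorted list to emit (first, last) pairs.
import Mathlib
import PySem

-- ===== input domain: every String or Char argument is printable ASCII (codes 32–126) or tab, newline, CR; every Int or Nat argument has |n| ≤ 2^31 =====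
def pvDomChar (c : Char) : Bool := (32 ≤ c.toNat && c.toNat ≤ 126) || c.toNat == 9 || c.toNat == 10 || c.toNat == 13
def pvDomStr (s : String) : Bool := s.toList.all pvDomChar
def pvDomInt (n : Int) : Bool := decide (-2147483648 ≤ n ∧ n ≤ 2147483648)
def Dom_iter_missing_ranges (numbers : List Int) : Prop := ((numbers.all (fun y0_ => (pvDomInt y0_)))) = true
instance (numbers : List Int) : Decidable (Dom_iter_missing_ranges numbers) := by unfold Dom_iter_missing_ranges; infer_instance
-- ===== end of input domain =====

-- B replaces A's single stateful pass (start/prev accumulator) with staged passes: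
-- compute the boundary indices where adjacent sorted values do not differ by 1,
-- then pair segment start indices (zero plus the cuts) with end indices (the cuts plus n)
-- and index back into the sorted list. Same cost; no speed claim.

-- ===== PORT A =====
-- A's for-loop over numbers[1:] with state (ranges, start, prev), plus the trailing append.
def pvALoop (ranges : List (Int × Int)) (start prev : Int) : List Int → List (Int × Int)
  | [] => ranges ++ [(start, prev)]
  | v :: rest =>
      if v = prev + 1 then pvALoop ranges start v rest
      else pvALoop (ranges ++ [(start, prev)]) v v rest

def iter_missing_ranges (numbers : List Int) : List (Int × Int) :=
  match PySem.List.sorted numbers (fun x => x) false with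
  | [] => []
  | n0 :: rest => pvALoop [] n0 n0 rest

-- ===== PORT B =====
-- xs[i] for B: every index B forms is in range, where pyGet? is some; .getD 0 is exact there.
def pvIdx (xs : List Int) (i : Int) : Int := (PySem.List.pyGet? xs i).getD 0

-- B's first pass: [i for i in range(1, n) if xs[i] - xs[i-1] != 1]
def pvCuts (xs : List Int) : List Int :=
  (PySem.List.pyRange 1 (xs.length : Int) 1).filter (fun i => pvIdx xs i - pvIdx xs (i - 1) != 1)

def iter_missing_ranges_alt (numbers : List Int) : List (Int × Int) :=
  let xs := PySem.List.sorted numbers (fun x => x) false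
  let n : Int := (xs.length : Int)
  if xs.length = 0 then []
  else
    let cuts := pvCuts xs
    let starts := 0 :: cuts
    let ends := cuts ++ [n]
    (starts.zip ends).map (fun se => (pvIdx xs se.1, pvIdx xs (se.2 - 1)))

-- ===== PRECONDITION & SPEC =====
def Spec_iter_missing_ranges (numbers : List Int) (out : List (Int × Int)) : Prop := out = iter_missing_ranges_alt numbers
instance (numbers : List Int) (out : List (Int × Int)) : Decidable (Spec_iter_missing_ranges numbers out) := by unfold Spec_iter_missing_ranges; infer_instance

-- ===== CLAIM (what is proved, stated in full; the proofs are below) =====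
def Claim_equal_iter_missing_ranges : Prop := ∀ (numbers : List Int), Dom_iter_missing_ranges numbers → Spec_iter_missing_ranges numbers (iter_missing_ranges numbers)

-- ===== LEMMAS AND PROOFS =====

-- Common cons-recursive characterisation: group a list into maximal +1-runs, built back-to-front.
def pvSpec : List Int → List (Int × Int)
  | [] => []
  | x :: rest =>
      match pvSpec rest with
      | [] => [(x, x)]
      | (a, b) :: rs => if a = x + 1 then (x, b) :: rs else (x, x) :: (a, b) :: rs

def pvConsRange (s p : Int) : List (Int × Int) → List (Int × Int)
  | [] => [(s, p)]
  | (a, b) :: rs => if a = p + 1 then (s, b) :: rs else (s, p) :: (a, b) :: rs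

theorem pvSpec_cons (x : Int) (rest : List Int) :
    pvSpec (x :: rest) = pvConsRange x x (pvSpec rest) := by
  simp only [pvSpec]
  cases pvSpec rest with
  | nil => rfl
  | cons h t => cases h; rfl

theorem pvSpec_head (y : Int) (t : List Int) :
    ∃ b rs, pvSpec (y :: t) = (y, b) :: rs := by
  simp only [pvSpec]
  cases pvSpec t with
  | nil => exact ⟨y, [], rfl⟩
  | cons ab rs =>
      obtain ⟨a, b⟩ := ab
      by_cases h : a = y + 1
      · exact ⟨b, rs, by simp [h]⟩
      · exact ⟨y, (a, b) :: rs, by simp [h]⟩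

theorem pvALoop_eq (l : List Int) : ∀ (acc : List (Int × Int)) (s p : Int),
    pvALoop acc s p l = acc ++ pvConsRange s p (pvSpec l) := by
  induction l with
  | nil => intro acc s p; simp [pvALoop, pvSpec, pvConsRange]
  | cons v rest ih =>
      intro acc s p
      simp only [pvALoop]
      by_cases hv : v = p + 1
      · subst hv
        rw [if_pos rfl, ih acc s (p + 1)]
        congr 1
        rw [pvSpec_cons]
        cases hr : pvSpec rest with
        | nil => simp [pvConsRange]
        | cons ab rs =>
            obtain ⟨a, b⟩ := ab
            by_cases ha : a = p + 1 + 1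
            · simp [pvConsRange, ha]
            · simp [pvConsRange, ha]
      · simp only [if_neg hv]
        rw [ih (acc ++ [(s, p)]) v v, ← pvSpec_cons, List.append_assoc]
        congr 1
        obtain ⟨b, rs, hspec⟩ := pvSpec_head v rest
        rw [hspec]
        simp [pvConsRange, hv]

theorem pvIdx_zero (x : Int) (xs : List Int) : pvIdx (x :: xs) 0 = x := by
  simp [pvIdx]

theorem pvIdx_succ (x : Int) (xs : List Int) (i : Int) (hi : 0 ≤ i) :
    pvIdx (x :: xs) (i + 1) = pvIdx xs i := by
  obtain ⟨n, rfl⟩ := Int.eq_ofNat_of_zero_le hi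
  simp [pvIdx, PySem.List.pyGet?_cons_succ]

theorem pvIdx_shift (x : Int) (xs : List Int) (i : Int) (hi : 1 ≤ i) :
    pvIdx (x :: xs) i = pvIdx xs (i - 1) := by
  have := pvIdx_succ x xs (i - 1) (by omega)
  simpa using this

theorem pvCuts_mem (xs : List Int) (i : Int) (h : i ∈ pvCuts xs) :
    1 ≤ i ∧ i < (xs.length : Int) := by
  unfold pvCuts at h
  have := List.mem_of_mem_filter h
  exact (PySem.List.mem_pyRange_one).1 this

theorem pvCuts_singleton (x : Int) : pvCuts [x] = [] := by
  unfold pvCuts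
  rw [PySem.List.pyRange_one_eq_nil (by simp)]
  rfl

theorem pvCuts_cons (x y : Int) (t : List Int) :
    pvCuts (x :: y :: t) =
      (if y - x ≠ 1 then [1] else []) ++ (pvCuts (y :: t)).map (· + 1) := by
  unfold pvCuts
  have hlen : ((x :: y :: t).length : Int) = ((y :: t).length : Int) + 1 := by simp
  rw [hlen]
  have h1 : (1 : Int) < ((y :: t).length : Int) + 1 := by simp
  rw [PySem.List.pyRange_one_cons h1]
  have h2 : (1 : Int) + 1 = 2 := by norm_num
  rw [h2]
  have hshift : PySem.List.pyRange 2 (((y :: t).length : Int) + 1) 1 =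
      (PySem.List.pyRange 1 ((y :: t).length : Int) 1).map (· + 1) := by
    rw [PySem.List.pyRange_one, PySem.List.pyRange_one]
    have : (((y :: t).length : Int) + 1 - 2).toNat = (((y :: t).length : Int) - 1).toNat := by omega
    rw [this, List.map_map]
    apply List.map_congr_left
    intro k _
    simp; omega
  rw [hshift, List.filter_cons]
  have hfilt : ((PySem.List.pyRange 1 ((y :: t).length : Int) 1).map (· + 1)).filter
        (fun i => pvIdx (x :: y :: t) i - pvIdx (x :: y :: t) (i - 1) != 1)
      = ((PySem.List.pyRange 1 ((y :: t).length : Int) 1).filter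
        (fun i => pvIdx (y :: t) i - pvIdx (y :: t) (i - 1) != 1)).map (· + 1) := by
    rw [List.filter_map]
    congr 1
    apply List.filter_congr
    intro i hi
    have h1i : 1 ≤ i := ((PySem.List.mem_pyRange_one).1 hi).1
    simp only [Function.comp_apply]
    rw [pvIdx_shift x _ (i + 1) (by omega), pvIdx_shift x _ (i + 1 - 1) (by omega)]
    norm_num
  rw [hfilt]
  have hp1 : pvIdx (x :: y :: t) 1 = y := by
    rw [pvIdx_shift x _ 1 le_rfl]; simpa using pvIdx_zero y t
  have hp0 : pvIdx (x :: y :: t) (1 - 1) = x := by norm_num [pvIdx_zero]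
  rw [hp1, hp0]
  by_cases hc : y - x ≠ 1
  · simp [hc]
  · simp at hc; simp [hc]

-- B's zip/map on a nonempty list computes pvSpec.
theorem pvB_eq_spec : ∀ (xs : List Int), xs ≠ [] →
    ((0 :: pvCuts xs).zip (pvCuts xs ++ [(xs.length : Int)])).map
      (fun se => (pvIdx xs se.1, pvIdx xs (se.2 - 1))) = pvSpec xs := by
  intro xs
  induction xs with
  | nil => intro h; exact absurd rfl h
  | cons x rest ih =>
      intro _
      cases rest with
      | nil =>
          simp [pvCuts_singleton, pvSpec, pvIdx]
      | cons y t =>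
          have ihy := ih (by simp)
          obtain ⟨b, rs, hspec⟩ := pvSpec_head y t
          rw [pvCuts_cons]
          set c := pvCuts (y :: t) with hc
          have hmem : ∀ e ∈ c ++ [((y :: t).length : Int)], 1 ≤ e := by
            intro e he
            rcases List.mem_append.1 he with h | h
            · exact (pvCuts_mem _ _ h).1
            · simp at h; subst h; simp
          have hlen : ((x :: y :: t).length : Int) = ((y :: t).length : Int) + 1 := by simp
          by_cases hcut : y - x ≠ 1
          · -- boundary at index 1: B emits (x,x) then B-on-rest shifted
            simp only [if_pos hcut]
            have hsh : (1 :: c.map (· + 1)) ++ [((x :: y :: t).length : Int)] =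
                1 :: (c ++ [((y :: t).length : Int)]).map (· + 1) := by
              simp
            rw [List.singleton_append, hsh]
            have h01 : (1 :: c.map (· + 1)) = (0 :: c).map (· + 1) := by simp
            have hzip : ∀ (l₁ l₂ : List Int),
                (l₁.map (· + 1)).zip (l₂.map (· + 1)) =
                  (l₁.zip l₂).map (fun se => (se.1 + 1, se.2 + 1)) := by
              intro l₁ l₂; rw [List.zip_map]; rfl
            simp only [List.zip_cons_cons, List.map_cons]
            rw [h01, hzip, List.map_map]
            have hpt : ∀ se ∈ (0 :: c).zip (c ++ [((y :: t).length : Int)]),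
                ((fun se => (pvIdx (x :: y :: t) se.1, pvIdx (x :: y :: t) (se.2 - 1))) ∘
                  (fun se => (se.1 + 1, se.2 + 1))) se
                = (fun se => (pvIdx (y :: t) se.1, pvIdx (y :: t) (se.2 - 1))) se := by
              intro se hse
              obtain ⟨hs, he⟩ := List.of_mem_zip hse
              have hs0 : 0 ≤ se.1 := by
                rcases List.mem_cons.1 hs with h0 | hs'
                · omega
                · have := (pvCuts_mem _ _ hs').1; omega
              have he1 : 1 ≤ se.2 := hmem _ he
              simp only [Function.comp_apply]
              rw [pvIdx_succ x _ se.1 hs0]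
              have : se.2 + 1 - 1 = (se.2 - 1) + 1 := by omega
              rw [this, pvIdx_succ x _ (se.2 - 1) (by omega)]
            rw [List.map_congr_left hpt, ihy, hspec, pvSpec_cons x (y :: t), hspec]
            have hx : pvIdx (x :: y :: t) 0 = x := pvIdx_zero x _
            have hx1 : pvIdx (x :: y :: t) (1 - 1) = x := by norm_num [pvIdx_zero]
            rw [hx, hx1]
            have hay : ¬ (y = x + 1) := by omega
            simp [pvConsRange, hay]
          · -- no boundary: head merges into the first range of the rest
            simp only [if_neg hcut]
            rw [List.nil_append]
            obtain ⟨h, t2, hE⟩ : ∃ h t2, c ++ [((y :: t).length : Int)] = h :: t2 := by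
              cases hc2 : c ++ [((y :: t).length : Int)] with
              | nil => exact absurd hc2 (by simp)
              | cons a l => exact ⟨a, l, rfl⟩
            have hh1 : 1 ≤ h := hmem h (by rw [hE]; simp)
            have hmap : c.map (· + 1) ++ [((x :: y :: t).length : Int)] =
                (h + 1) :: t2.map (· + 1) := by
              rw [hlen, show (c.map (· + 1) ++ [((y :: t).length : Int) + 1]) =
                (c ++ [((y :: t).length : Int)]).map (· + 1) by simp, hE]
              rfl
            rw [hmap]
            simp only [List.zip_cons_cons, List.map_cons]
            have hzip : (c.map (· + 1)).zip (t2.map (· + 1)) =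
                (c.zip t2).map (fun se => (se.1 + 1, se.2 + 1)) := by
              rw [List.zip_map]; rfl
            rw [hzip, List.map_map]
            have hpt : ∀ se ∈ c.zip t2,
                ((fun se => (pvIdx (x :: y :: t) se.1, pvIdx (x :: y :: t) (se.2 - 1))) ∘
                  (fun se => (se.1 + 1, se.2 + 1))) se
                = (fun se => (pvIdx (y :: t) se.1, pvIdx (y :: t) (se.2 - 1))) se := by
              intro se hse
              obtain ⟨hs, he⟩ := List.of_mem_zip hse
              have hs0 : 0 ≤ se.1 := by have := (pvCuts_mem _ _ hs).1; omega
              have he1 : 1 ≤ se.2 := hmem _ (by rw [hE]; exact List.mem_cons_of_mem _ he)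
              simp only [Function.comp_apply]
              rw [pvIdx_succ x _ se.1 hs0]
              have : se.2 + 1 - 1 = (se.2 - 1) + 1 := by omega
              rw [this, pvIdx_succ x _ (se.2 - 1) (by omega)]
            rw [List.map_congr_left hpt]
            -- relate to IH: its LHS is (0,h) :: zip c t2 mapped
            rw [hE] at ihy
            simp only [List.zip_cons_cons, List.map_cons] at ihy
            rw [hspec] at ihy
            have hb : pvIdx (y :: t) (h - 1) = b := by
              have := congrArg (fun l => l.headD (0, 0)) ihy
              simp [pvIdx_zero] at this
              exact this
            have hrs : (c.zip t2).map
                (fun se => (pvIdx (y :: t) se.1, pvIdx (y :: t) (se.2 - 1))) = rs := by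
              have := congrArg List.tail ihy
              simpa using this
            have hhead : pvIdx (x :: y :: t) 0 = x := pvIdx_zero x _
            have hh : pvIdx (x :: y :: t) (h + 1 - 1) = pvIdx (y :: t) (h - 1) := by
              have : h + 1 - 1 = (h - 1) + 1 := by omega
              rw [this, pvIdx_succ x _ (h - 1) (by omega)]
            rw [hhead, hh, hb, hrs]
            rw [pvSpec_cons, hspec]
            have hay : y = x + 1 := by omega
            simp [pvConsRange, hay]

-- ===== VERDICT (by name: the statement is the Claim_ definition above) =====
theorem iter_missing_ranges_spec : Claim_equal_iter_missing_ranges := by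
  intro numbers _
  unfold Spec_iter_missing_ranges iter_missing_ranges iter_missing_ranges_alt
  cases h : PySem.List.sorted numbers (fun x => x) false with
  | nil => simp
  | cons n0 rest =>
      dsimp only
      rw [pvALoop_eq, ← pvSpec_cons, List.nil_append,
        ← pvB_eq_spec (n0 :: rest) (by simp)]
      simp
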